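-- pv_equiv track=rewrite | github.com/dmonzonis/advent-of-code-2017 | day24/day24.py | find_strongest
-- ===== SOURCE A (Python) =====
-- class Bridge:
--     """Represents a bridge of magnetic pieces.
--
--     Holds information about available pieces to construct the bridge, current pieces used
--     in the bridge and the available port of the last piece in the bridge."""
--
--     def __init__(self, available, bridge=[], port=0):
--         """Initialize bridge variables."""
--         self.available = available
--         self.bridge = bridge
--         self.port = port
--
--     def strength(self):
--         """Return the strength of the current bridge."""
--         return sum([sum([port for port in piece]) for piece in self.bridge])
--
--     def fitting_pieces(self):
--         """Return a list of pieces that can be used to extend the current bridge."""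
--         return [piece for piece in self.available if self.port in piece]
--
--     def add_piece(self, piece):
--         """Return a new bridge with the piece added to it and removed from the available list."""
--         new_bridge = self.bridge + [piece]
--         # The new port is the unmatched port in the added piece
--         new_port = piece[0] if piece[1] == self.port else piece[1]
--         new_available = self.available[:]
--         new_available.remove(piece)
--         return Bridge(new_available, new_bridge, new_port)
--
-- def find_strongest(pieces):
--     """Find strongest bridge constructable with a given list of pieces."""
--     max_strength = 0
--     queue = [Bridge(pieces)]
--     while queue:
--         bridge = queue.pop(0)
--         fitting = bridge.fitting_pieces()
--         if not fitting:
--             strength = bridge.strength()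
--             if strength > max_strength:
--                 max_strength = strength
--             continue
--
--         for piece in fitting:
--             queue.append(bridge.add_piece(piece))
--
--     return max_strength
-- ===== SOURCE B (Python) =====
-- def find_strongest(pieces):
--     """Find strongest bridge constructable with a given list of pieces."""
--     def best(avail, port):
--         top = None
--         for piece in avail:
--             a, b = piece
--             if port == a or port == b:
--                 rest = avail[:]
--                 rest.remove(piece)
--                 s = a + b + best(rest, b if port == a else a)
--                 if top is None or s > top:
--                     top = s
--         return top if top is not None else 0
--     return max(0, best(pieces, 0))
-- ===== Notes on version B (the rewrite author's own statement) =====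
-- stated objective: faster
-- what changed: Replaces A's breadth-first queue that materialises every partial bridge (with O(queue) pop(0) and a full strength re-summation at each dead end) by a direct recursive DFS that returns the best remaining strength incrementally, keeping no queue and no bridge lists.
import Mathlib
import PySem

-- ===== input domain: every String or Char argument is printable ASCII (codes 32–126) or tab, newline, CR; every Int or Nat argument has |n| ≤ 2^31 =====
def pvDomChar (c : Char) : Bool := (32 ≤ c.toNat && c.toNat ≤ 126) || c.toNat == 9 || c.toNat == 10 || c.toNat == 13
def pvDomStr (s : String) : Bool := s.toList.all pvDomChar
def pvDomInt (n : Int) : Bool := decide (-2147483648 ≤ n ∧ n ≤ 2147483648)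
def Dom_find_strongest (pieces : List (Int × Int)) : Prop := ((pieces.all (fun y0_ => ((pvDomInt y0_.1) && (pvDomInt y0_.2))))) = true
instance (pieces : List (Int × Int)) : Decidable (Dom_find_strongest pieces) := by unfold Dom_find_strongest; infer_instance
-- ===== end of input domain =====

-- B replaces A's BFS queue of materialised partial bridges by a direct recursive DFS with
-- incremental strength (faster: no O(queue) pop(0), no re-summation of whole bridges).

-- ===== PORT A =====
-- A's Bridge object: available pieces, pieces used so far, open port.
structure BridgeA where
  available : List (Int × Int)
  bridge : List (Int × Int)
  port : Int
deriving Repr, DecidableEq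

-- Bridge.strength: sum([sum(piece) for piece in bridge])
def strengthA (br : List (Int × Int)) : Int := (br.map (fun p => p.1 + p.2)).sum

-- Bridge.fitting_pieces: [piece for piece in available if port in piece]
def fittingA (b : BridgeA) : List (Int × Int) :=
  b.available.filter (fun p => b.port == p.1 || b.port == p.2)

-- Bridge.add_piece: list.remove removes the first equal element; the piece always is a
-- member of `available` at every call site, where List.erase is exact for Python's remove.
def addPieceA (b : BridgeA) (p : Int × Int) : BridgeA :=
  { available := b.available.erase p,
    bridge := b.bridge ++ [p],
    port := if p.2 == b.port then p.1 else p.2 }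

-- the while loop over the queue; the Nat argument is a fuel guard for totality only
def loopA : Nat → List BridgeA → Int → Int
  | _, [], m => m
  | 0, _ :: _, m => m
  | f + 1, b :: queue, m =>
    let fitting := fittingA b
    if fitting.isEmpty then
      let s := strengthA b.bridge
      loopA f queue (if s > m then s else m)
    else
      loopA f (queue ++ fitting.map (addPieceA b)) m

-- sufficient fuel: fuelW k bounds the iteration count from a bridge with k available pieces
def fuelW : Nat → Nat
  | 0 => 1
  | k + 1 => 1 + (k + 1) * fuelW k

def find_strongest (pieces : List (Int × Int)) : Int :=
  loopA (fuelW pieces.length) [⟨pieces, [], 0⟩] 0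

-- ===== PORT B =====
-- best(avail, port): the two fueled functions are the recursion and its for-loop;
-- the Nat fuel is a totality guard only (avail shrinks on every recursive call).
mutual
def altGo : Nat → List (Int × Int) → Int → Int
  | 0, _, _ => 0
  | f + 1, avail, port => altScan f avail avail port none
termination_by f _ _ => (f, 0)

def altScan : Nat → List (Int × Int) → List (Int × Int) → Int → Option Int → Int
  | _, [], _, _, top => top.getD 0
  | f, p :: rest, avail, port, top =>
    if port == p.1 || port == p.2 then
      let s := p.1 + p.2 + altGo f (avail.erase p) (if port == p.1 then p.2 else p.1)
      altScan f rest avail port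
        (some (match top with | none => s | some t => max t s))
    else altScan f rest avail port top
termination_by f rem _ _ _ => (f, rem.length + 1)
end

def find_strongest_alt (pieces : List (Int × Int)) : Int :=
  max 0 (altGo (pieces.length + 1) pieces 0)

-- ===== PRECONDITION & SPEC =====
def Spec_find_strongest (pieces : List (Int × Int)) (out : Int) : Prop := out = find_strongest_alt pieces
instance (pieces : List (Int × Int)) (out : Int) : Decidable (Spec_find_strongest pieces out) := by unfold Spec_find_strongest; infer_instance

-- ===== CLAIM (what is proved, stated in full; the proofs are below) =====
def Claim_equal_find_strongest : Prop := ∀ (pieces : List (Int × Int)), Dom_find_strongest pieces → Spec_find_strongest pieces (find_strongest pieces)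

-- ===== LEMMAS AND PROOFS =====

-- canonical value of B's recursion (with provably sufficient fuel)
def vG (avail : List (Int × Int)) (port : Int) : Int := altGo (avail.length + 1) avail port

-- B's port value: piece strength plus the best continuation after removing the piece
def pvVal (avail : List (Int × Int)) (port : Int) (p : Int × Int) : Int :=
  p.1 + p.2 + vG (avail.erase p) (if port == p.1 then p.2 else p.1)

-- the fold performed by altScan's loop, expressed on the canonical value
def oStep (avail : List (Int × Int)) (port : Int) (t : Option Int) (p : Int × Int) : Option Int :=
  some (match t with | none => pvVal avail port p | some x => max x (pvVal avail port p))

-- maximal dead-end strength reachable from a bridge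
def HB (b : BridgeA) : Int := strengthA b.bridge + vG b.available b.port

def stepH (m : Int) (b : BridgeA) : Int := max m (HB b)

def measQ (q : List BridgeA) : Nat := (q.map (fun b => fuelW b.available.length)).sum

theorem fuelW_pos (k : Nat) : 1 ≤ fuelW k := by
  cases k <;> simp [fuelW]

theorem erase_length_of_mem {l : List (Int × Int)} {p : Int × Int} (h : p ∈ l) :
    (l.erase p).length = l.length - 1 := by
  simpa using List.length_erase_of_mem h

-- fuel irrelevance for altGo / altScan
theorem alt_fuel : ∀ (n : Nat) (avail : List (Int × Int)), avail.length ≤ n →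
    ∀ f f' port, avail.length < f → avail.length < f' →
      altGo f avail port = altGo f' avail port := by
  intro n
  induction n with
  | zero =>
    intro avail hlen f f' port hf hf'
    have hav : avail = [] := List.eq_nil_of_length_eq_zero (Nat.le_zero.mp hlen)
    subst hav
    match f, f', hf, hf' with
    | g + 1, g' + 1, _, _ => simp [altGo, altScan]
  | succ n ih =>
    intro avail hlen f f' port hf hf'
    obtain ⟨g, rfl⟩ : ∃ g, f = g + 1 := ⟨f - 1, by omega⟩
    obtain ⟨g', rfl⟩ : ∃ g', f' = g' + 1 := ⟨f' - 1, by omega⟩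
    simp only [altGo]
    have hsub : ∀ p ∈ avail, p ∈ avail := fun _ h => h
    -- inner induction on the scanned remainder
    have : ∀ rem, (∀ p ∈ rem, p ∈ avail) → ∀ top,
        altScan g rem avail port top = altScan g' rem avail port top := by
        intro rem
        induction rem with
        | nil => intro _ top; simp [altScan]
        | cons p rest ihr =>
          intro hmem top
          have hp : p ∈ avail := hmem p (List.mem_cons_self ..)
          have hrest : ∀ q ∈ rest, q ∈ avail := fun q hq => hmem q (List.mem_cons_of_mem _ hq)
          have hel : (avail.erase p).length = avail.length - 1 := erase_length_of_mem hp
          have hpos : 1 ≤ avail.length := List.length_pos_of_mem hp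
          have hle : (avail.erase p).length ≤ n := by omega
          have hgo : altGo g (avail.erase p) (if port == p.1 then p.2 else p.1)
              = altGo g' (avail.erase p) (if port == p.1 then p.2 else p.1) := by
            apply ih _ hle <;> omega
          by_cases hfit : (port == p.1 || port == p.2) = true
          · simp only [altScan, hfit, if_true, hgo]
            exact ihr hrest _
          · simp only [altScan, hfit]
            exact ihr hrest top
    exact this avail hsub none

theorem altGo_eq_vG (f : Nat) (avail : List (Int × Int)) (port : Int)
    (hf : avail.length < f) : altGo f avail port = vG avail port :=
  alt_fuel avail.length avail le_rfl f (avail.length + 1) port hf (Nat.lt_succ_self _)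

-- altScan computes the oStep fold over the fitting pieces of the remainder
theorem altScan_spec : ∀ (rem avail : List (Int × Int)) (port : Int) (top : Option Int) (f : Nat),
    (∀ p ∈ rem, p ∈ avail) → avail.length ≤ f →
    altScan f rem avail port top
      = ((rem.filter (fun p => port == p.1 || port == p.2)).foldl (oStep avail port) top).getD 0 := by
  intro rem
  induction rem with
  | nil => intro avail port top f _ _; simp [altScan]
  | cons p rest ih =>
    intro avail port top f hmem hf
    have hp : p ∈ avail := hmem p (List.mem_cons_self ..)
    have hrest : ∀ q ∈ rest, q ∈ avail := fun q hq => hmem q (List.mem_cons_of_mem _ hq)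
    have hel : (avail.erase p).length = avail.length - 1 := erase_length_of_mem hp
    have hlt : (avail.erase p).length < f := by
      have := List.length_pos_of_mem hp; omega
    by_cases hfit : (port == p.1 || port == p.2) = true
    · simp only [altScan, hfit, if_true, List.filter_cons, List.foldl_cons]
      rw [altGo_eq_vG _ _ _ hlt, ih _ _ _ _ hrest hf]
      rfl
    · simp only [altScan, hfit, List.filter_cons]
      simp only [Bool.false_eq_true, if_false]
      exact ih _ _ _ _ hrest hf

theorem vG_spec (avail : List (Int × Int)) (port : Int) :
    vG avail port
      = ((avail.filter (fun p => port == p.1 || port == p.2)).foldl (oStep avail port) none).getD 0 := by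
  have := altScan_spec avail avail port none avail.length (fun _ h => h) le_rfl
  simpa [vG, altGo] using this

theorem oStep_some (avail : List (Int × Int)) (port : Int) :
    ∀ (l : List (Int × Int)) (x : Int),
      l.foldl (oStep avail port) (some x) = some (l.foldl (fun a p => max a (pvVal avail port p)) x) := by
  intro l
  induction l with
  | nil => intro x; rfl
  | cons p rest ih => intro x; simp [oStep, ih]

-- max-fold commutation
theorem foldl_stepH_max : ∀ (l : List BridgeA) (m x : Int),
    l.foldl stepH (max m x) = max (l.foldl stepH m) x := by
  intro l
  induction l with
  | nil => intro m x; rfl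
  | cons b rest ih =>
    intro m x
    simp only [List.foldl_cons, stepH]
    rw [show max (max m x) (HB b) = max (max m (HB b)) x by omega, ih]

-- distributing a constant addition through a max-fold
theorem foldl_max_add (S : Int) (v : (Int × Int) → Int) :
    ∀ (l : List (Int × Int)) (M x : Int),
      l.foldl (fun a p => max a (S + v p)) (max M (S + x))
        = max M (S + l.foldl (fun a p => max a (v p)) x) := by
  intro l
  induction l with
  | nil => intro M x; rfl
  | cons p rest ih =>
    intro M x
    simp only [List.foldl_cons]
    rw [show max (max M (S + x)) (S + v p) = max M (S + max x (v p)) by omega, ih]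

theorem strengthA_append (br : List (Int × Int)) (p : Int × Int) :
    strengthA (br ++ [p]) = strengthA br + (p.1 + p.2) := by
  simp [strengthA]

-- HB of a child, for a fitting piece
theorem HB_addPiece (b : BridgeA) (p : Int × Int) (hfit : (b.port == p.1 || b.port == p.2) = true) :
    HB (addPieceA b p) = strengthA b.bridge + pvVal b.available b.port p := by
  have hport : (if p.2 == b.port then p.1 else p.2) = (if b.port == p.1 then p.2 else p.1) := by
    simp only [beq_iff_eq, Bool.or_eq_true] at hfit ⊢
    rcases hfit with h | h <;> split_ifs <;> omega
  simp only [HB, addPieceA, pvVal, strengthA_append, hport]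
  ring

-- the fitting children of a bridge fold to max with the bridge's own HB
theorem children_fold (b : BridgeA) (hne : fittingA b ≠ []) (M : Int) :
    (fittingA b |>.map (addPieceA b)).foldl stepH M = max M (HB b) := by
  obtain ⟨p, ps, hps⟩ := List.exists_cons_of_ne_nil hne
  have hfitall : ∀ q ∈ fittingA b, (b.port == q.1 || b.port == q.2) = true := by
    intro q hq; exact (List.mem_filter.mp hq).2
  have hp : (b.port == p.1 || b.port == p.2) = true := hfitall p (hps ▸ List.mem_cons_self ..)
  have hvG : vG b.available b.port
      = ps.foldl (fun a q => max a (pvVal b.available b.port q)) (pvVal b.available b.port p) := by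
    rw [vG_spec]
    show ((fittingA b).foldl (oStep b.available b.port) none).getD 0 = _
    rw [hps, List.foldl_cons, show oStep b.available b.port none p = some (pvVal b.available b.port p) from rfl,
      oStep_some]
    rfl
  have hmap : ∀ (l : List (Int × Int)), (∀ q ∈ l, (b.port == q.1 || b.port == q.2) = true) →
      ∀ M', (l.map (addPieceA b)).foldl stepH M'
        = l.foldl (fun a q => max a (strengthA b.bridge + pvVal b.available b.port q)) M' := by
    intro l
    induction l with
    | nil => intro _ M'; rfl
    | cons q rest ih =>
      intro hall M'
      simp only [List.map_cons, List.foldl_cons, stepH]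
      rw [HB_addPiece b q (hall q (List.mem_cons_self ..))]
      exact ih (fun r hr => hall r (List.mem_cons_of_mem _ hr)) _
  rw [hps]
  rw [hmap (p :: ps) (hps ▸ hfitall) M]
  simp only [List.foldl_cons]
  rw [show max M (strengthA b.bridge + pvVal b.available b.port p)
      = max M (strengthA b.bridge + pvVal b.available b.port p) from rfl]
  rw [foldl_max_add (strengthA b.bridge) (pvVal b.available b.port) ps M (pvVal b.available b.port p)]
  rw [HB, hvG]

-- dead end: no fitting piece means the best continuation is 0
theorem HB_deadend (b : BridgeA) (h : fittingA b = []) : HB b = strengthA b.bridge := by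
  have : vG b.available b.port = 0 := by
    rw [vG_spec]
    show ((fittingA b).foldl (oStep b.available b.port) none).getD 0 = 0
    rw [h]; rfl
  simp [HB, this]

theorem measQ_children (b : BridgeA) (hne : fittingA b ≠ []) :
    measQ ((fittingA b).map (addPieceA b)) + 1 ≤ fuelW b.available.length := by
  have hlenall : ∀ q ∈ fittingA b, (b.available.erase q).length = b.available.length - 1 := by
    intro q hq
    exact erase_length_of_mem (List.mem_filter.mp hq).1
  obtain ⟨p, ps, hps⟩ := List.exists_cons_of_ne_nil hne
  have hp : p ∈ b.available := (List.mem_filter.mp (hps ▸ List.mem_cons_self ..)).1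
  have hpos : 1 ≤ b.available.length := List.length_pos_of_mem hp
  obtain ⟨k, hk⟩ : ∃ k, b.available.length = k + 1 := ⟨b.available.length - 1, by omega⟩
  -- each child contributes fuelW k
  have hsum : ∀ (l : List (Int × Int)), (∀ q ∈ l, q ∈ b.available) →
      measQ (l.map (addPieceA b)) = l.length * fuelW k := by
    intro l
    induction l with
    | nil => intro _; simp [measQ]
    | cons q rest ih =>
      intro hall
      have hq : q ∈ b.available := hall q (List.mem_cons_self ..)
      have : (b.available.erase q).length = k := by
        rw [erase_length_of_mem hq]; omega
      simp only [measQ, List.map_cons, List.map_map, List.sum_cons] at ih ⊢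
      rw [ih (fun r hr => hall r (List.mem_cons_of_mem _ hr))]
      simp [addPieceA, this]; ring
  have hlf : (fittingA b).length ≤ b.available.length := List.length_filter_le _ _
  rw [hsum (fittingA b) (fun q hq => (List.mem_filter.mp hq).1), hk, fuelW]
  have h1 : (fittingA b).length * fuelW k ≤ (k + 1) * fuelW k :=
    Nat.mul_le_mul_right _ (by omega)
  omega

theorem measQ_append (q r : List BridgeA) : measQ (q ++ r) = measQ q + measQ r := by
  simp [measQ]

-- the BFS loop equals the max-fold of HB over the queue, given sufficient fuel
theorem loopA_spec : ∀ (f : Nat) (q : List BridgeA) (m : Int), measQ q ≤ f →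
    loopA f q m = q.foldl stepH m := by
  intro f
  induction f with
  | zero =>
    intro q m hq
    cases q with
    | nil => rfl
    | cons b rest =>
      exfalso
      have := fuelW_pos b.available.length
      simp only [measQ, List.map_cons, List.sum_cons] at hq
      omega
  | succ f ih =>
    intro q m hq
    cases q with
    | nil => rfl
    | cons b rest =>
      have hmeas : measQ rest + fuelW b.available.length ≤ f + 1 := by
        simp only [measQ, List.map_cons, List.sum_cons] at hq ⊢; omega
      have hwpos := fuelW_pos b.available.length
      by_cases hfit : (fittingA b).isEmpty = true
      · have hnil : fittingA b = [] := List.isEmpty_iff.mp hfit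
        simp only [loopA, hfit, if_true]
        rw [ih rest _ (by omega)]
        simp only [List.foldl_cons, stepH, HB_deadend b hnil]
        congr 1
        rcases lt_or_ge m (strengthA b.bridge) with h | h
        · rw [if_pos (by omega), max_eq_right (by omega)]
        · rw [if_neg (by omega), max_eq_left (by omega)]
      · have hne : fittingA b ≠ [] := fun h => hfit (by simp [h])
        have hfit' : (fittingA b).isEmpty = false := by
          simpa using hfit
        simp only [loopA, hfit', Bool.false_eq_true, if_false]
        have hm : measQ (rest ++ (fittingA b).map (addPieceA b)) ≤ f := by
          rw [measQ_append]
          have := measQ_children b hne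
          omega
        rw [ih _ _ hm, List.foldl_append, children_fold b hne, List.foldl_cons]
        rw [show stepH m b = max m (HB b) from rfl, foldl_stepH_max]

-- ===== VERDICT (by name: the statement is the Claim_ definition above) =====
theorem find_strongest_spec : Claim_equal_find_strongest := by
  intro pieces _
  unfold Spec_find_strongest find_strongest find_strongest_alt
  rw [loopA_spec (fuelW pieces.length) [⟨pieces, [], 0⟩] 0 (by simp [measQ])]
  simp only [List.foldl_cons, List.foldl_nil, stepH, HB, strengthA, List.map_nil, List.sum_nil,
    zero_add]
  rw [show altGo (pieces.length + 1) pieces 0 = vG pieces 0 from rfl]
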